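-- pv_equiv track=rewrite | github.com/julianandrews/adventofcode | 2019/python/day04.py | is_candidate
-- ===== SOURCE A (Python) =====
-- def is_candidate(number):
--     run_length = 1
--     adjacent_pair = False
--
--     digits = [int(c) for c in str(number)]
--     for d1, d2 in zip(digits, digits[1:]):
--         if d2 < d1:
--             return False
--         if d1 == d2:
--             run_length += 1
--         else:
--             if run_length == 2:
--                 adjacent_pair = True
--             run_length = 1
--
--     return adjacent_pair or run_length == 2
-- ===== SOURCE B (Python) =====
-- def is_candidate(number):
--     digits = [int(c) for c in str(number)]
--     if sorted(digits) != digits: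
--         return False
--     run_lens = []
--     rest = digits
--     while rest:
--         d = rest[0]
--         run = 0
--         while rest and rest[0] == d:
--             run += 1
--             rest = rest[1:]
--         run_lens.append(run)
--     return 2 in run_lens
-- ===== Notes on version B (the rewrite author's own statement) =====
-- stated objective: simpler
-- what changed: Replaces A's fused single pass (pairwise comparison with run-length state and early return) by a clean decomposition: a sortedness check (sorted(digits) == digits) followed by explicit run-length encoding and a membership test '2 in run_lens'.
import Mathlib
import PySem

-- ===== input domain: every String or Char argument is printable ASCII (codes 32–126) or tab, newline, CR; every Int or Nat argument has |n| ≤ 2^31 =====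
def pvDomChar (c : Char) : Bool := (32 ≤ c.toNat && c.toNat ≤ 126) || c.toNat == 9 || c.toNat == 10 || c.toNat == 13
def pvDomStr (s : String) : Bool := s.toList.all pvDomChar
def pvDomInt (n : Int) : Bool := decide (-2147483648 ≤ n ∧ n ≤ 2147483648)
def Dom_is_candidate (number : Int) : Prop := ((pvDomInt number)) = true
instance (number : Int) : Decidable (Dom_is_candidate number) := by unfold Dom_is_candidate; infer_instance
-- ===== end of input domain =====

-- B replaces A's fused early-return run-length pass by a sortedness check plus run-length
-- encoding and a membership test (objective: simpler decomposition; same asymptotic cost class).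

-- ===== PORT A =====
-- digits = [int(c) for c in str(number)]; exact for digit chars — Pre_ (0 ≤ number) excludes
-- negatives, where int('-') raises ValueError (there ofChars? is none and getD supplies 0).
-- (shared by both ports: A's and B's Python contain this identical line)
def pvDigits (number : Int) : List Int :=
  (PySem.Int.toChars number).map (fun c => (PySem.Int.ofChars? [c]).getD 0)

-- the for-loop over zip(digits, digits[1:]) with state (run_length, adjacent_pair)
def pvLoopA : List (Int × Int) → Int → Bool → Bool
  | [], run_length, adjacent_pair => adjacent_pair || decide (run_length = 2)
  | (d1, d2) :: rest, run_length, adjacent_pair =>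
    if d2 < d1 then false
    else if d1 = d2 then pvLoopA rest (run_length + 1) adjacent_pair
    else pvLoopA rest 1 (if run_length = 2 then true else adjacent_pair)

def is_candidate (number : Int) : Bool :=
  let digits := pvDigits number
  pvLoopA (digits.zip digits.tail) 1 false

-- ===== PORT B =====
-- the while-loop run-length encoder of Source B: inner while = takeWhile/dropWhile on the rest
def pvRunLens : List Int → List Nat
  | [] => []
  | x :: xs =>
    ((xs.takeWhile (· == x)).length + 1) :: pvRunLens (xs.dropWhile (· == x))
termination_by ds => ds.length
decreasing_by
  simp only [List.length_cons]
  exact Nat.lt_succ_of_le (List.length_dropWhile_le _ _)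

def is_candidate_alt (number : Int) : Bool :=
  let digits := pvDigits number
  if PySem.List.sorted digits (fun x => x) false ≠ digits then false
  else (pvRunLens digits).contains 2

-- ===== PRECONDITION & SPEC =====
-- Pre_ excludes negative numbers: there str(number) starts with '-' and int('-') raises
-- ValueError in A (and in B alike).
def Pre_is_candidate (number : Int) : Prop := 0 ≤ number
instance (number : Int) : Decidable (Pre_is_candidate number) := by unfold Pre_is_candidate; infer_instance
def pvWitness_is_candidate : Int := (122)

def Spec_is_candidate (number : Int) (out : Bool) : Prop := out = is_candidate_alt number
instance (number : Int) (out : Bool) : Decidable (Spec_is_candidate number out) := by unfold Spec_is_candidate; infer_instance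

-- ===== CLAIM (what is proved, stated in full; the proofs are below) =====
def Claim_equal_is_candidate : Prop := ∀ (number : Int), Dom_is_candidate number → Pre_is_candidate number → Spec_is_candidate number (is_candidate number)

-- ===== LEMMAS AND PROOFS =====

-- proof-side characterisation of A's remaining-run behaviour
def pvGood : Int → List Int → Bool
  | rl, [] => decide (rl = 2)
  | rl, [_] => decide (rl = 2)
  | rl, x :: y :: t => if x = y then pvGood (rl + 1) (y :: t) else decide (rl = 2) || pvGood 1 (y :: t)

theorem pvLoopA_eq (ds : List Int) :
    ∀ rl ap, pvLoopA (ds.zip ds.tail) rl ap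
      = (decide (List.IsChain (· ≤ ·) ds) && (ap || pvGood rl ds)) := by
  induction ds with
  | nil => intro rl ap; simp [pvLoopA, pvGood]
  | cons x xs ih =>
    intro rl ap
    cases xs with
    | nil => simp [pvLoopA, pvGood]
    | cons y t =>
      have ih' := ih
      simp only [List.zip, List.tail_cons] at ih' ⊢
      rw [List.zipWith_cons_cons]
      by_cases hlt : y < x
      · have hxy : ¬ x ≤ y := by omega
        simp [pvLoopA, hlt, List.isChain_cons_cons, hxy]
      · by_cases heq : x = y
        · subst heq
          rw [pvLoopA, if_neg hlt, if_pos rfl, ih']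
          simp [pvGood, List.isChain_cons_cons]
        · have hle : x ≤ y := by omega
          rw [pvLoopA, if_neg hlt, if_neg heq, ih']
          simp [pvGood, heq, List.isChain_cons_cons, hle]
          by_cases h2 : rl = 2 <;>
            simp [h2, Bool.or_assoc, Bool.or_comm, Bool.or_left_comm]

theorem pvGood_run (xs : List Int) : ∀ (x : Int) (k : Int),
    pvGood k (x :: xs)
      = (decide (k + ((xs.takeWhile (· == x)).length : Int) = 2)
          || pvGood 1 (xs.dropWhile (· == x))) := by
  induction xs with
  | nil => intro x k; simp [pvGood]
  | cons y t ih =>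
    intro x k
    by_cases hxy : x = y
    · subst hxy
      rw [pvGood, if_pos rfl, ih]
      simp only [List.takeWhile, List.dropWhile, BEq.rfl, List.length_cons]
      congr 1
      rw [decide_eq_decide]
      push_cast
      omega
    · have hb : (y == x) = false := beq_eq_false_iff_ne.mpr (fun h => hxy h.symm)
      simp [pvGood, hxy, List.takeWhile, List.dropWhile, hb]

theorem pvGood_eq_runLens_aux : ∀ (n : Nat) (ds : List Int), ds.length ≤ n →
    pvGood 1 ds = (pvRunLens ds).contains 2 := by
  intro n
  induction n with
  | zero =>
    intro ds h
    have : ds = [] := List.eq_nil_of_length_eq_zero (Nat.le_zero.mp h)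
    subst this; simp [pvGood, pvRunLens]
  | succ m ih =>
    intro ds h
    cases ds with
    | nil => simp [pvGood, pvRunLens]
    | cons x xs =>
      rw [pvGood_run, pvRunLens,
        ih (xs.dropWhile (· == x)) (by
          have := List.length_dropWhile_le (· == x) xs
          simp at h; omega)]
      simp only [List.contains_cons]
      have h1 : decide ((1 : Int) + ((xs.takeWhile (· == x)).length : Int) = 2)
          = ((2 : Nat) == ((xs.takeWhile (· == x)).length + 1)) := by
        rcases eq_or_ne (xs.takeWhile (· == x)).length 1 with hL | hL
        · simp [hL]
        · have h2 : ¬ ((1 : Int) + ((xs.takeWhile (· == x)).length : Int) = 2) := by omega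
          have h3 : ¬ ((2 : Nat) = (xs.takeWhile (· == x)).length + 1) := by omega
          simp [h2, h3, hL]
      rw [h1]

theorem pvGood_eq_runLens (ds : List Int) : pvGood 1 ds = (pvRunLens ds).contains 2 :=
  pvGood_eq_runLens_aux ds.length ds (Nat.le_refl _)

theorem sorted_eq_iff_chain' (ds : List Int) :
    PySem.List.sorted ds (fun x => x) false = ds ↔ List.IsChain (· ≤ ·) ds := by
  rw [List.isChain_iff_pairwise]
  constructor
  · intro h
    have := PySem.List.sorted_pairwise ds (fun x => x)
    rwa [h] at this
  · intro h
    exact PySem.List.sorted_eq_self_of_pairwise (xs := ds) (key := fun x => x) h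

-- ===== VERDICT (by name: the statement is the Claim_ definition above) =====
theorem is_candidate_spec : Claim_equal_is_candidate := by
  intro number _ _
  unfold Spec_is_candidate is_candidate is_candidate_alt
  rw [pvLoopA_eq, pvGood_eq_runLens]
  by_cases hs : PySem.List.sorted (pvDigits number) (fun x => x) false = pvDigits number
  · simp [hs, (sorted_eq_iff_chain' (pvDigits number)).mp hs]
  · have : ¬ List.IsChain (· ≤ ·) (pvDigits number) :=
      fun h => hs ((sorted_eq_iff_chain' (pvDigits number)).mpr h)
    simp [hs, this]
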